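-- pv_equiv track=rewrite | github.com/phm314/aoc-2021 | day9.py | find_lowpoint_1d
-- ===== SOURCE A (Python) =====
-- def find_lowpoint_1d(lst):
--     """ finds singular lowest point in a simple list. """
--     large = [[0 for i in row] for row in lst]
--     for row_ind, test in enumerate(lst):
--
--         sol_inds = []
--         for ind, num in enumerate(test):
--             # trace every starting point maybe?
--             # until it reaches a low point [p < n1 && p < n2]
--             # else check next point in same direction...
--
--             nxt = []
--             if ind != (len(test) - 1):
--                 nxt.append(ind + 1)
--             if ind != 0:
--                 nxt.append(ind - 1)
--
--             pts = []
--             for nxt_ind in nxt: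
--                 if test[nxt_ind] < num:
--                     pts.append(nxt_ind)
--                 elif test[nxt_ind] == num:
--                     # appends to end of current array, making sure that
--                     # nxt_ind exists
--                     to_app = nxt_ind + (-1 if nxt_ind < ind else 1)
--                     if 0 <= to_app <= len(test) - 1:
--                         nxt.append(to_app)
--
--             if len(pts) == 0:
--                 sol_inds.append(ind)
--         for sol_ind in sol_inds:
--             large[row_ind][sol_ind] = 1
--     return large
-- ===== SOURCE B (Python) =====
-- def find_lowpoint_1d(lst):
--     """ finds singular lowest point in a simple list. """
--     out = []
--     for row in lst:
--         n = len(row)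
--         marks = [0] * n
--         i = 0
--         while i < n:
--             v = row[i]
--             j = i
--             while j + 1 < n and row[j + 1] == v:
--                 j += 1
--             if (i == 0 or row[i - 1] > v) and (j == n - 1 or row[j + 1] > v):
--                 for k in range(i, j + 1):
--                     marks[k] = 1
--             i = j + 1
--         out.append(marks)
--     return out
-- ===== Notes on version B (the rewrite author's own statement) =====
-- stated objective: faster
-- what changed: A walks a plateau step by step from every index (re-scanning each equal-value run once per member); B scans each row once, grouping each maximal run of equal values and checking only the run's two boundary neighbours.
import Mathlib
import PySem

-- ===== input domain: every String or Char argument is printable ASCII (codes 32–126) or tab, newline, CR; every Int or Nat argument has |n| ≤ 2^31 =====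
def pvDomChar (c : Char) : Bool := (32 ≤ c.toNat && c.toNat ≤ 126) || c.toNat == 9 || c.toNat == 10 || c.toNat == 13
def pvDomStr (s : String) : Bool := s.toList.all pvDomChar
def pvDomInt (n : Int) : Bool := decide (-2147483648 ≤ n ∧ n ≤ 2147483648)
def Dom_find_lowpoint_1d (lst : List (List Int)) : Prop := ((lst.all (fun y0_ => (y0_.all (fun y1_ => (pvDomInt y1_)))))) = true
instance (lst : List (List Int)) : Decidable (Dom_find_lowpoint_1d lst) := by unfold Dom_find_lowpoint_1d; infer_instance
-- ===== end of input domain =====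

-- B replaces A's per-index plateau walk (quadratic on long equal runs) with one linear
-- scan per row that groups each maximal run of equal values and checks its two boundary
-- neighbours; objective: faster (measured).

-- ===== PORT A =====
-- termination measure for the 'for nxt_ind in nxt' loop that appends to nxt while
-- iterating: each appended index moves one step further from ind and stays in range,
-- so its distance-to-the-wall weight strictly decreases.
def pvW (n ind q : Int) : Nat := if q < ind then (q + 1).toNat else (n - q).toNat

def pvM (n ind : Int) (queue : List Int) : Nat := (queue.map (pvW n ind)).sum

theorem pvW_to_app_lt (n ind q : Int)
    (h0 : 0 ≤ q + (if q < ind then -1 else 1))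
    (h1 : q + (if q < ind then -1 else 1) ≤ n - 1) :
    pvW n ind (q + (if q < ind then -1 else 1)) < pvW n ind q := by
  by_cases hq : q < ind
  · have e : q + (if q < ind then -1 else 1) = q - 1 := by rw [if_pos hq]; ring
    rw [e] at h0 h1 ⊢
    unfold pvW
    rw [if_pos (by omega : q - 1 < ind), if_pos hq]
    omega
  · have e : q + (if q < ind then -1 else 1) = q + 1 := by rw [if_neg hq]
    rw [e] at h0 h1 ⊢
    unfold pvW
    rw [if_neg (by omega : ¬ q + 1 < ind), if_neg hq]
    omega

-- the inner 'for nxt_ind in nxt' loop of A: processes the queue front to back,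
-- appending at the back exactly when the Python code appends to nxt
def traceLoop (test : List Int) (ind num : Int) (queue : List Int) (pts : List Int) :
    List Int :=
  match queue with
  | [] => pts
  | q :: rest =>
    match PySem.List.pyGet? test q with
    | none => traceLoop test ind num rest pts  -- unreachable: Python's queue indices are in range
    | some v =>
      if v < num then traceLoop test ind num rest (pts ++ [q])
      else if v = num then
        if h : 0 ≤ q + (if q < ind then -1 else 1) ∧
               q + (if q < ind then -1 else 1) ≤ (test.length : Int) - 1 then
          traceLoop test ind num (rest ++ [q + (if q < ind then -1 else 1)]) pts
        else traceLoop test ind num rest pts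
      else traceLoop test ind num rest pts
termination_by 2 * pvM test.length ind queue + queue.length
decreasing_by
  all_goals simp only [pvM, dite_eq_ite, List.map_append, List.map_cons, List.map_nil,
    List.sum_append, List.sum_cons, List.sum_nil, List.length_append, List.length_cons,
    List.length_nil]
  all_goals try omega
  have := pvW_to_app_lt test.length ind q h.1 h.2
  omega

-- large[row_ind] is written only by iteration row_ind of the outer loop, so the
-- enumerate-and-mutate over 'large' is ported as a per-row map
def find_lowpoint_1d (lst : List (List Int)) : List (List Int) :=
  lst.map (fun test =>
    let zeros := test.map (fun _ => (0 : Int))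
    let sol_inds := (PySem.List.enumerate test 0).foldl
      (fun si p =>
        let nxt : List Int :=
          (if p.1 ≠ (test.length : Int) - 1 then [p.1 + 1] else []) ++
          (if p.1 ≠ 0 then [p.1 - 1] else [])
        if (traceLoop test p.1 p.2 nxt []).length == 0 then si ++ [p.1] else si) []
    sol_inds.foldl (fun r i => PySem.List.pySetD r i 1) zeros)

-- ===== PORT B =====
-- one row of B: split off the leading maximal run of equal values, mark the whole
-- run 1 iff the value before the run (prev) and the value after it are both strictly
-- larger or absent, continue after the run
def altRow (prev : Option Int) (row : List Int) : List Int :=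
  match row with
  | [] => []
  | v :: rest =>
    let run := rest.takeWhile (fun x => x == v)
    let rest' := rest.dropWhile (fun x => x == v)
    let leftOk : Bool := match prev with | none => true | some p => decide (v < p)
    let rightOk : Bool := match rest' with | [] => true | w :: _ => decide (v < w)
    List.replicate (run.length + 1) (if leftOk && rightOk then (1 : Int) else 0) ++
      altRow (some v) rest'
termination_by row.length
decreasing_by
  simp only [List.length_cons]
  have := List.length_dropWhile_le (fun x => x == v) rest
  omega

def find_lowpoint_1d_alt (lst : List (List Int)) : List (List Int) :=
  lst.map (altRow none)

-- ===== PRECONDITION & SPEC =====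
def Spec_find_lowpoint_1d (lst : List (List Int)) (out : List (List Int)) : Prop := out = find_lowpoint_1d_alt lst
instance (lst : List (List Int)) (out : List (List Int)) : Decidable (Spec_find_lowpoint_1d lst out) := by unfold Spec_find_lowpoint_1d; infer_instance

-- ===== CLAIM (what is proved, stated in full; the proofs are below) =====
def Claim_equal_find_lowpoint_1d : Prop := ∀ (lst : List (List Int)), Dom_find_lowpoint_1d lst → Spec_find_lowpoint_1d lst (find_lowpoint_1d lst)

-- ===== LEMMAS AND PROOFS =====

-- the value of a single chain of A's walk: scan away from ind over values equal to num,
-- true iff the first different value is strictly larger or the walk leaves the row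
def chainB (test : List Int) (ind num : Int) (q : Int) : Bool :=
  match PySem.List.pyGet? test q with
  | none => true
  | some v =>
    if v < num then false
    else if v = num then
      if h : 0 ≤ q + (if q < ind then -1 else 1) ∧
             q + (if q < ind then -1 else 1) ≤ (test.length : Int) - 1 then
        chainB test ind num (q + (if q < ind then -1 else 1))
      else true
    else true
termination_by pvW test.length ind q
decreasing_by exact pvW_to_app_lt test.length ind q h.1 h.2

-- list-level form of one chain
def scanOk (v : Int) : List Int → Bool
  | [] => true
  | x :: xs => if x < v then false else if x = v then scanOk v xs else true

-- positionwise specification both rows are reduced to; ctx = reversed left context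
def specRow (ctx : List Int) : List Int → List Int
  | [] => []
  | v :: rest =>
    (if scanOk v rest && scanOk v ctx then (1 : Int) else 0) :: specRow (v :: ctx) rest

theorem scanOk_append_of_all (v : Int) (pre l : List Int) (h : ∀ x ∈ pre, x = v) :
    scanOk v (pre ++ l) = scanOk v l := by
  induction pre with
  | nil => rfl
  | cons x xs ih =>
    have hx : x = v := h x (by simp)
    simp only [List.cons_append, scanOk, hx, if_neg (lt_irrefl v)]
    exact ih (fun y hy => h y (by simp [hy]))

theorem specRow_length (ctx row : List Int) : (specRow ctx row).length = row.length := by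
  induction row generalizing ctx with
  | nil => rfl
  | cons v rest ih => simp [specRow, ih]

theorem specRow_getElem (row : List Int) (ctx : List Int) (i : Nat) (h : i < row.length)
    (h' : i < (specRow ctx row).length) :
    (specRow ctx row)[i] =
      if scanOk row[i] (row.drop (i + 1)) && scanOk row[i] ((row.take i).reverse ++ ctx)
      then 1 else 0 := by
  induction row generalizing ctx i with
  | nil => simp at h
  | cons v rest ih =>
    cases i with
    | zero => simp [specRow]
    | succ j =>
      have hj : j < rest.length := by simpa using h
      simp only [specRow, List.getElem_cons_succ, List.drop_succ_cons, List.take_succ_cons,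
        List.reverse_cons, List.append_assoc]
      exact ih (v :: ctx) j hj (by simpa [specRow_length] using hj)

theorem specRow_run (v : Int) (run ctx rest' : List Int) (h : ∀ x ∈ run, x = v) :
    specRow ctx (run ++ rest') =
      List.replicate run.length (if scanOk v rest' && scanOk v ctx then (1 : Int) else 0) ++
        specRow (run.reverse ++ ctx) rest' := by
  induction run generalizing ctx with
  | nil => simp
  | cons x xs ih =>
    have hx : x = v := h x (by simp)
    subst hx
    have hall : ∀ y ∈ xs, y = x := fun y hy => h y (by simp [hy])
    have h1 : scanOk x (xs ++ rest') = scanOk x rest' :=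
      scanOk_append_of_all x xs rest' hall
    have h2 : scanOk x (x :: ctx) = scanOk x ctx := scanOk_append_of_all x [x] ctx (by simp)
    simp only [List.cons_append, specRow, h1, List.length_cons, List.replicate_succ,
      List.reverse_cons, List.append_assoc]
    rw [ih (x :: ctx) hall, h2]
    simp

theorem dropWhile_head?_ne (v : Int) (l : List Int) (w : Int)
    (h : (l.dropWhile (fun x => x == v)).head? = some w) : w ≠ v := by
  cases hd : l.dropWhile (fun x => x == v) with
  | nil => simp [hd] at h
  | cons y ys =>
    rw [hd] at h
    simp only [List.head?_cons, Option.some.injEq] at h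
    subst h
    have := List.head_dropWhile_not (fun x => x == v) (l := l) (by simp [hd])
    simpa [hd] using this

theorem scanOk_cons_ne (v w : Int) (ws : List Int) (h : w ≠ v) :
    scanOk v (w :: ws) = decide (v < w) := by
  by_cases hlt : w < v
  · simp [scanOk, hlt]; omega
  · simp [scanOk, hlt, h]; omega

theorem rightOk_eq_scanOk (v : Int) (l : List Int) :
    (∀ w, l.head? = some w → w ≠ v) →
    (match l with | [] => true | w :: _ => decide (v < w)) = scanOk v l := by
  cases l with
  | nil => exact fun _ => rfl
  | cons w ws => exact fun h => (scanOk_cons_ne v w ws (h w rfl)).symm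

theorem leftOk_eq_scanOk (v : Int) (ctx : List Int) (h : ctx.head? ≠ some v) :
    (match ctx.head? with | none => true | some p => decide (v < p)) = scanOk v ctx := by
  cases ctx with
  | nil => rfl
  | cons c cs =>
    simp only [List.head?_cons]
    exact (scanOk_cons_ne v c cs (by simpa using h)).symm

theorem altRow_eq_specRow_aux (n : Nat) : ∀ (row ctx : List Int), row.length ≤ n →
    (∀ v, row.head? = some v → ctx.head? ≠ some v) →
    altRow ctx.head? row = specRow ctx row := by
  induction n with
  | zero =>
    intro row ctx hl _
    have : row = [] := by cases row <;> simp_all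
    subst this; simp [altRow, specRow]
  | succ n ih =>
    intro row ctx hl hne
    cases row with
    | nil => simp [altRow, specRow]
    | cons v rest =>
      obtain ⟨run, rest', hrun, hrest'⟩ :
          ∃ run rest', run = rest.takeWhile (fun x => x == v) ∧
            rest' = rest.dropWhile (fun x => x == v) := ⟨_, _, rfl, rfl⟩
      have hsplit : run ++ rest' = rest := by
        rw [hrun, hrest']; exact List.takeWhile_append_dropWhile
      have hall : ∀ x ∈ run, x = v := by
        intro x hx
        rw [hrun] at hx
        simpa using List.mem_takeWhile_imp hx
      have hhd : ∀ w, rest'.head? = some w → w ≠ v := fun w hw =>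
        dropWhile_head?_ne v rest w (by rw [← hrest']; exact hw)
      -- RHS
      have hR : specRow ctx (v :: rest) =
          List.replicate (run.length + 1)
            (if scanOk v rest' && scanOk v ctx then (1 : Int) else 0) ++
          specRow (run.reverse ++ v :: ctx) rest' := by
        have h1 : scanOk v (run ++ rest') = scanOk v rest' :=
          scanOk_append_of_all v run rest' hall
        have h2 : scanOk v (v :: ctx) = scanOk v ctx :=
          scanOk_append_of_all v [v] ctx (by simp)
        conv_lhs => rw [← hsplit]
        show (if scanOk v (run ++ rest') && scanOk v ctx then (1:Int) else 0) ::
            specRow (v :: ctx) (run ++ rest') = _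
        rw [specRow_run v run (v :: ctx) rest' hall, h1, h2]
        try simp [List.replicate_succ]
      rw [hR]
      -- LHS
      have hleft := leftOk_eq_scanOk v ctx (hne v rfl)
      have hright := rightOk_eq_scanOk v rest' hhd
      rw [altRow.eq_def]
      simp only [← hrun, ← hrest', hleft, hright, Bool.and_comm]
      congr 1
      have hctx' : (run.reverse ++ v :: ctx).head? = some v := by
        cases hrv : run.reverse with
        | nil => simp
        | cons r rs =>
          have : r ∈ run := by
            have : r ∈ run.reverse := by rw [hrv]; simp
            simpa using this
          have := hall r this
          simp [this]
      rw [← hctx']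
      apply ih rest' (run.reverse ++ v :: ctx)
      · have h1 : rest'.length ≤ rest.length := by
          rw [← hsplit]; simp
        have : rest.length ≤ n := by simpa using hl
        omega
      · intro w hw
        rw [hctx']
        intro hcon
        exact hhd w hw (by injection hcon; omega)


theorem traceLoop_nil (test : List Int) (ind num : Int) (pts : List Int) :
    traceLoop test ind num [] pts = pts := by
  rw [traceLoop.eq_def]

theorem traceLoop_cons_none (test : List Int) (ind num q : Int) (rest pts : List Int)
    (hv : PySem.List.pyGet? test q = none) :
    traceLoop test ind num (q :: rest) pts = traceLoop test ind num rest pts := by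
  rw [traceLoop.eq_def]; simp only [hv]

theorem traceLoop_cons_some (test : List Int) (ind num q v : Int) (rest pts : List Int)
    (hv : PySem.List.pyGet? test q = some v) :
    traceLoop test ind num (q :: rest) pts =
      (if v < num then traceLoop test ind num rest (pts ++ [q])
       else if v = num then
         if h : 0 ≤ q + (if q < ind then -1 else 1) ∧
                q + (if q < ind then -1 else 1) ≤ (test.length : Int) - 1 then
           traceLoop test ind num (rest ++ [q + (if q < ind then -1 else 1)]) pts
         else traceLoop test ind num rest pts
       else traceLoop test ind num rest pts) := by
  rw [traceLoop.eq_def]; simp only [hv]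

theorem chainB_some (test : List Int) (ind num q v : Int)
    (hv : PySem.List.pyGet? test q = some v) :
    chainB test ind num q =
      (if v < num then false
       else if v = num then
         if h : 0 ≤ q + (if q < ind then -1 else 1) ∧
                q + (if q < ind then -1 else 1) ≤ (test.length : Int) - 1 then
           chainB test ind num (q + (if q < ind then -1 else 1))
         else true
       else true) := by
  rw [chainB.eq_def]; simp only [hv]

theorem chainB_true_of_get_none (test : List Int) (ind num q : Int)
    (hv : PySem.List.pyGet? test q = none) : chainB test ind num q = true := by
  rw [chainB.eq_def, hv]

theorem traceLoop_empty_iff (test : List Int) (ind num : Int) (queue pts : List Int) :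
    traceLoop test ind num queue pts = [] ↔
      pts = [] ∧ ∀ q ∈ queue, chainB test ind num q = true := by
  suffices H : ∀ m queue pts, 2 * pvM test.length ind queue + queue.length = m →
      (traceLoop test ind num queue pts = [] ↔
        pts = [] ∧ ∀ q ∈ queue, chainB test ind num q = true) from
    H _ queue pts rfl
  intro m
  induction m using Nat.strong_induction_on with
  | _ m IH =>
    intro queue pts hm
    cases queue with
    | nil => rw [traceLoop_nil]; simp
    | cons q rest =>
      have hrest : 2 * pvM test.length ind rest + rest.length < m := by
        simp only [pvM, List.map_cons, List.sum_cons, List.length_cons] at hm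
        simp only [pvM]; omega
      cases hv : PySem.List.pyGet? test q with
      | none =>
        rw [traceLoop_cons_none test ind num q rest pts hv]
        simp only [List.forall_mem_cons, chainB_true_of_get_none test ind num q hv,
          true_and]
        exact IH _ hrest rest pts rfl
      | some v =>
        rw [traceLoop_cons_some test ind num q v rest pts hv]
        by_cases hlt : v < num
        · simp only [if_pos hlt]
          rw [IH _ hrest rest (pts ++ [q]) rfl]
          have hcq : chainB test ind num q = false := by
            rw [chainB_some test ind num q v hv, if_pos hlt]
          simp [hcq]
        · by_cases heq : v = num
          · simp only [if_neg hlt, if_pos heq]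
            by_cases h : 0 ≤ q + (if q < ind then -1 else 1) ∧
                q + (if q < ind then -1 else 1) ≤ (test.length : Int) - 1
            · rw [dif_pos h]
              have happ : 2 * pvM test.length ind (rest ++ [q + (if q < ind then -1 else 1)]) +
                  (rest ++ [q + (if q < ind then -1 else 1)]).length < m := by
                simp only [pvM, List.map_append, List.map_cons, List.map_nil,
                  List.sum_append, List.sum_cons, List.sum_nil, List.length_append,
                  List.length_cons, List.length_nil] at hm ⊢
                have := pvW_to_app_lt test.length ind q h.1 h.2
                omega
              rw [IH _ happ _ pts rfl]
              have hcq : chainB test ind num q =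
                  chainB test ind num (q + (if q < ind then -1 else 1)) := by
                rw [chainB_some test ind num q v hv, if_neg hlt, if_pos heq, dif_pos h]
              simp only [List.forall_mem_append, List.forall_mem_cons, hcq]
              tauto
            · rw [dif_neg h]
              have hcq : chainB test ind num q = true := by
                rw [chainB_some test ind num q v hv, if_neg hlt, if_pos heq, dif_neg h]
              rw [IH _ hrest rest pts rfl]
              simp [hcq]
          · simp only [if_neg hlt, if_neg heq]
            have hcq : chainB test ind num q = true := by
              rw [chainB_some test ind num q v hv, if_neg hlt, if_neg heq]
            rw [IH _ hrest rest pts rfl]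
            simp [hcq]

theorem chainB_right (test : List Int) (ind num : Int) (j : Nat) (hj : ind < (j : Int)) :
    chainB test ind num j = scanOk num (test.drop j) := by
  suffices H : ∀ m j, test.length - j = m → ind < (j : Int) →
      chainB test ind num j = scanOk num (test.drop j) from H _ j rfl hj
  clear hj j
  intro m
  induction m using Nat.strong_induction_on with
  | _ m IH =>
    intro j hm hj
    by_cases hn : test.length ≤ j
    · have h1 : PySem.List.pyGet? test (j : Int) = none := by
        rw [PySem.List.pyGet?_natCast, List.getElem?_eq_none hn]
      have h2 : test.drop j = [] := List.drop_eq_nil_of_le hn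
      rw [chainB_true_of_get_none test ind num _ h1, h2]
      rfl
    · have hn : j < test.length := by omega
      have h1 : PySem.List.pyGet? test (j : Int) = some test[j] := by
        rw [PySem.List.pyGet?_natCast, List.getElem?_eq_getElem hn]
      have h2 : test.drop j = test[j] :: test.drop (j + 1) := List.drop_eq_getElem_cons hn
      rw [chainB_some test ind num _ _ h1, h2]
      by_cases hlt : test[j] < num
      · simp [scanOk, hlt]
      · by_cases heq : test[j] = num
        · have hnotlt : ¬ ((j : Int) < ind) := by omega
          simp only [if_neg hnotlt, scanOk, heq, lt_irrefl, if_false, if_true]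
          by_cases h : 0 ≤ (j : Int) + 1 ∧ (j : Int) + 1 ≤ (test.length : Int) - 1
          · rw [dif_pos h]
            have hc : (j : Int) + 1 = ((j + 1 : Nat) : Int) := by push_cast; ring
            rw [hc]
            exact IH (test.length - (j + 1)) (by omega) (j + 1) rfl (by omega)
          · rw [dif_neg h]
            have : test.length ≤ j + 1 := by omega
            rw [List.drop_eq_nil_of_le this]
            rfl
        · simp [scanOk, hlt, heq]

theorem chainB_left (test : List Int) (ind num : Int) (j : Nat) (hj : (j : Int) < ind)
    (hn : j < test.length) :
    chainB test ind num j = scanOk num ((test.take (j + 1)).reverse) := by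
  induction j using Nat.strong_induction_on with
  | _ j IH =>
    have h1 : PySem.List.pyGet? test (j : Int) = some test[j] := by
      rw [PySem.List.pyGet?_natCast, List.getElem?_eq_getElem hn]
    have h2 : (test.take (j + 1)).reverse = test[j] :: (test.take j).reverse := by
      rw [List.take_add_one, List.getElem?_eq_getElem hn]
      simp
    rw [chainB_some test ind num _ _ h1, h2]
    by_cases hlt : test[j] < num
    · simp [scanOk, hlt]
    · by_cases heq : test[j] = num
      · simp only [if_pos hj, scanOk, heq, lt_irrefl, if_false, if_true]
        cases j with
        | zero =>
          rw [dif_neg (by norm_num)]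
          simp [scanOk]
        | succ k =>
          have hg : 0 ≤ ((k + 1 : Nat) : Int) + -1 ∧
              ((k + 1 : Nat) : Int) + -1 ≤ (test.length : Int) - 1 := by
            constructor <;> [push_cast; push_cast] <;> omega
          rw [dif_pos hg]
          have hc : ((k + 1 : Nat) : Int) + -1 = ((k : Nat) : Int) := by push_cast; ring
          rw [hc]
          have := IH k (by omega) (by omega) (by omega)
          simpa using this
      · simp [scanOk, hlt, heq]




theorem altRow_eq_specRow (row ctx : List Int)
    (h : ∀ v, row.head? = some v → ctx.head? ≠ some v) :
    altRow ctx.head? row = specRow ctx row :=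
  altRow_eq_specRow_aux row.length row ctx le_rfl h

theorem foldl_pySetD_length (inds : List Int) (r : List Int) :
    (inds.foldl (fun acc q => PySem.List.pySetD acc q 1) r).length = r.length := by
  induction inds generalizing r with
  | nil => rfl
  | cons x xs ih => simp [List.foldl_cons, ih, PySem.List.length_pySetD]

theorem foldl_pySetD_getElem? (inds : List Int) (r : List Int)
    (hpos : ∀ x ∈ inds, 0 ≤ x) (i : Nat) (hi : i < r.length) :
    (inds.foldl (fun acc q => PySem.List.pySetD acc q 1) r)[i]? =
      some (if (i : Int) ∈ inds then 1 else r[i]) := by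
  induction inds generalizing r with
  | nil => simp [List.getElem?_eq_getElem hi]
  | cons x xs ih =>
    have hx : 0 ≤ x := hpos x (by simp)
    simp only [List.foldl_cons]
    rw [PySem.List.pySetD_of_nonneg r 1 hx,
      ih _ (fun y hy => hpos y (by simp [hy])) (by simpa using hi)]
    congr 1
    by_cases hmem : (i : Int) ∈ xs
    · simp [hmem]
    · simp only [List.mem_cons, hmem, or_false]
      by_cases hxi : x = (i : Int)
      · simp [hxi]
      · have hne : x.toNat ≠ i := by omega
        have hxi' : ¬ ((i : Int) = x) := fun h => hxi h.symm
        simp [hxi', hne]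

theorem length_beq_zero (l : List Int) : (l.length == 0) = decide (l = []) := by
  cases l <;> rfl

theorem trace_cond_eq (test : List Int) (k : Nat) (hk : k < test.length) :
    ((traceLoop test (k : Int) test[k]
        ((if (k : Int) ≠ (test.length : Int) - 1 then [(k : Int) + 1] else []) ++
         (if (k : Int) ≠ 0 then [(k : Int) - 1] else [])) []).length == 0) =
      (scanOk test[k] (test.drop (k + 1)) && scanOk test[k] ((test.take k).reverse)) := by
  rw [length_beq_zero]
  have hR : (∀ q ∈ (if (k : Int) ≠ (test.length : Int) - 1 then [(k : Int) + 1] else []),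
      chainB test (k : Int) test[k] q = true) ↔
      scanOk test[k] (test.drop (k + 1)) = true := by
    by_cases hk1 : (k : Int) = (test.length : Int) - 1
    · have hlen : test.length ≤ k + 1 := by omega
      simp [hk1, List.drop_eq_nil_of_le hlen, scanOk]
    · have hc : (k : Int) + 1 = ((k + 1 : Nat) : Int) := by push_cast; ring
      simp only [ne_eq, hk1, not_false_iff, if_true, List.mem_singleton,
        forall_eq, hc]
      rw [chainB_right test (k : Int) test[k] (k + 1) (by push_cast; omega)]
  have hL : (∀ q ∈ (if (k : Int) ≠ 0 then [(k : Int) - 1] else []),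
      chainB test (k : Int) test[k] q = true) ↔
      scanOk test[k] ((test.take k).reverse) = true := by
    by_cases hk0 : (k : Int) = 0
    · have : k = 0 := by omega
      subst this
      simp [scanOk]
    · have hk1 : 1 ≤ k := by omega
      have hc : (k : Int) - 1 = ((k - 1 : Nat) : Int) := by push_cast [hk1]; ring
      simp only [ne_eq, hk0, not_false_iff, if_true, List.mem_singleton,
        forall_eq, hc]
      rw [chainB_left test (k : Int) test[k] (k - 1) (by push_cast [hk1]; omega) (by omega)]
      have : k - 1 + 1 = k := by omega
      rw [this]
  have hiff := traceLoop_empty_iff test (k : Int) test[k]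
      ((if (k : Int) ≠ (test.length : Int) - 1 then [(k : Int) + 1] else []) ++
       (if (k : Int) ≠ 0 then [(k : Int) - 1] else [])) []
  rw [List.forall_mem_append] at hiff
  have hiff' : (traceLoop test (k : Int) test[k]
      ((if (k : Int) ≠ (test.length : Int) - 1 then [(k : Int) + 1] else []) ++
       (if (k : Int) ≠ 0 then [(k : Int) - 1] else [])) [] = []) ↔
      (scanOk test[k] (test.drop (k + 1)) = true ∧
       scanOk test[k] ((test.take k).reverse) = true) := by
    rw [hiff, hR, hL]
    tauto
  rcases hb : scanOk test[k] (test.drop (k + 1)) <;>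
    rcases hb2 : scanOk test[k] ((test.take k).reverse) <;>
    rw [hb, hb2] at hiff' <;> simp only [hiff'] <;> decide

theorem arow_eq_specRow (test : List Int) :
    (let zeros := test.map (fun _ => (0 : Int))
     let sol_inds := (PySem.List.enumerate test 0).foldl
       (fun si p =>
         let nxt : List Int :=
           (if p.1 ≠ (test.length : Int) - 1 then [p.1 + 1] else []) ++
           (if p.1 ≠ 0 then [p.1 - 1] else [])
         if (traceLoop test p.1 p.2 nxt []).length == 0 then si ++ [p.1] else si) []
     sol_inds.foldl (fun r i => PySem.List.pySetD r i 1) zeros) = specRow [] test := by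
  show ((PySem.List.enumerate test 0).foldl
      (fun si p =>
        if (traceLoop test p.1 p.2
             ((if p.1 ≠ (test.length : Int) - 1 then [p.1 + 1] else []) ++
              (if p.1 ≠ 0 then [p.1 - 1] else [])) []).length == 0
        then si ++ [p.1] else si) []).foldl
      (fun r i => PySem.List.pySetD r i 1) (test.map (fun _ => (0 : Int))) = specRow [] test
  rw [PySem.List.foldl_append_if
    (fun p : Int × Int =>
      (traceLoop test p.1 p.2
        ((if p.1 ≠ (test.length : Int) - 1 then [p.1 + 1] else []) ++
         (if p.1 ≠ 0 then [p.1 - 1] else [])) []).length == 0)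
    (fun p : Int × Int => p.1)]
  rw [List.nil_append]
  set sol := (((PySem.List.enumerate test 0).filter
      (fun p : Int × Int =>
        (traceLoop test p.1 p.2
          ((if p.1 ≠ (test.length : Int) - 1 then [p.1 + 1] else []) ++
           (if p.1 ≠ 0 then [p.1 - 1] else [])) []).length == 0)).map
      (fun p : Int × Int => p.1)) with hsol
  have hpos : ∀ x ∈ sol, 0 ≤ x := by
    intro x hx
    rw [hsol] at hx
    obtain ⟨p, hp, rfl⟩ := List.mem_map.mp hx
    have := (PySem.List.mem_enumerate_iff _ _ _).mp (List.mem_filter.mp hp).1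
    obtain ⟨kk, hkk, rfl⟩ := this
    simp
  have hmem : ∀ (i : Nat) (hi : i < test.length),
      ((i : Int) ∈ sol ↔
        (scanOk test[i] (test.drop (i + 1)) && scanOk test[i] ((test.take i).reverse)) = true) := by
    intro i hi
    rw [hsol]
    constructor
    · intro hx
      obtain ⟨p, hp, hfst⟩ := List.mem_map.mp hx
      obtain ⟨hpmem, hP⟩ := List.mem_filter.mp hp
      obtain ⟨kk, hkk, rfl⟩ := (PySem.List.mem_enumerate_iff _ _ _).mp hpmem
      simp only [zero_add] at hfst hP ⊢
      have hki : kk = i := by exact_mod_cast hfst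
      subst hki
      rwa [trace_cond_eq test kk hkk] at hP
    · intro hcond
      apply List.mem_map.mpr
      refine ⟨((i : Int), test[i]), List.mem_filter.mpr ⟨?_, ?_⟩, rfl⟩
      · exact (PySem.List.mem_enumerate_iff _ _ _).mpr ⟨i, hi, by simp⟩
      · rw [trace_cond_eq test i hi]
        exact hcond
  apply List.ext_getElem
  · rw [foldl_pySetD_length, List.length_map, specRow_length]
  · intro i hi1 hi2
    have hi : i < test.length := by
      rwa [foldl_pySetD_length, List.length_map] at hi1
    have h1 := foldl_pySetD_getElem? sol (test.map (fun _ => (0 : Int))) hpos i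
      (by simpa using hi)
    rw [List.getElem?_eq_getElem hi1] at h1
    have h2 := specRow_getElem test [] i hi (by rwa [specRow_length])
    rw [List.append_nil] at h2
    rw [h2]
    have h1' := Option.some.inj h1
    rw [h1']
    rw [List.getElem_map]
    by_cases hc : (scanOk test[i] (test.drop (i + 1)) && scanOk test[i] ((test.take i).reverse)) = true
    · rw [if_pos ((hmem i hi).mpr hc), if_pos hc]
    · rw [if_neg (fun hmm => hc ((hmem i hi).mp hmm)), if_neg hc]

-- ===== VERDICT (by name: the statement is the Claim_ definition above) =====
theorem find_lowpoint_1d_spec : Claim_equal_find_lowpoint_1d := by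
  intro lst _
  unfold Spec_find_lowpoint_1d find_lowpoint_1d find_lowpoint_1d_alt
  refine List.map_congr_left (fun test _ => ?_)
  exact (arow_eq_specRow test).trans (altRow_eq_specRow test [] (by simp)).symm
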